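-- pv_equiv track=rewrite | github.com/davidhyun/Algorithm | 그래프(Graph)/programmers_순위.py | solution
-- ===== SOURCE A (Python) =====
-- from collections import defaultdict
--
-- def solution(n, results):
--     answer = 0
--     win = defaultdict(set) # 누구누구를 이긴다
--     lose = defaultdict(set) # 누구누구한테 진다
--
--     for winner, loser in results:
--         win[winner].add(loser)
--         lose[loser].add(winner)
--
--     for boxer in range(1, n+1):
--         # boxer에게 진 사람들은 boxer를 이긴 사람들에게 모두 진다.
--         for loser in win[boxer]:
--             lose[loser].update(lose[boxer])
--
--         # boxer를 이긴 사람들은 모두 boxer가 이긴 사람들을 이긴다.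
--         for winner in lose[boxer]:
--             win[winner].update(win[boxer])
--
--     # 해당 선수의 지고, 이긴 선수의 개수 합이 n-1(자기자신 제외)이면 순위를 결정할 수 있다
--     for boxer in range(1, n+1):
--         if len(win[boxer]) + len(lose[boxer]) == n - 1:
--             answer += 1
--
--     return answer
-- ===== SOURCE B (Python) =====
-- def solution(n, results):
--     # adjacency: fwd[x] = boxers x beat (direct), bwd[x] = boxers x lost to (direct)
--     fwd, bwd = {}, {}
--     for w, l in results:
--         fwd.setdefault(w, set()).add(l)
--         bwd.setdefault(l, set()).add(w)
--
--     # per-boxer breadth-first expansion to a fixpoint; only ranked boxers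
--     # (labels 1..n) propagate results, matching the problem's boxer numbering
--     def reach(start, adj):
--         s = set(adj.get(start, ()))
--         for _ in range(n):
--             grow = set()
--             for x in s:
--                 if 1 <= x <= n:
--                     grow |= adj.get(x, set())
--             new = grow - s
--             if not new:
--                 break
--             s |= new
--         return s
--
--     return sum(1 for b in range(1, n + 1)
--                if len(reach(b, fwd)) + len(reach(b, bwd)) == n - 1)
-- ===== Notes on version B (the rewrite author's own statement) =====
-- stated objective: alternative
-- what changed: Replaces A's global single-pass pivot merging of win/lose defaultdict sets by a per-boxer breadth-first fixpoint expansion: adjacency dicts are built once, then each boxer's forward and backward reachable sets are grown one step per round (expanding only through ranked boxers 1..n) until stable, and the counts are summed with a generator.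
import Mathlib
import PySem

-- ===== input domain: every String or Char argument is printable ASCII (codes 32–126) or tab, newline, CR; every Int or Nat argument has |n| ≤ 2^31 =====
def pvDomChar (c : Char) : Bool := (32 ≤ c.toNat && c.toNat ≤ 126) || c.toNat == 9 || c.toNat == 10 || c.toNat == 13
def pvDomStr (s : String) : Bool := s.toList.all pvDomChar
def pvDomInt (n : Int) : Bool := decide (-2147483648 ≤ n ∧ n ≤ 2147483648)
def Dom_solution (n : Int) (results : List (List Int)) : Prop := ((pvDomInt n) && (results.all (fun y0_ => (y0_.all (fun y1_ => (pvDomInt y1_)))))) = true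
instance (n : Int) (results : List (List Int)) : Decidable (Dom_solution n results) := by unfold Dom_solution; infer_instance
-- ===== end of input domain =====

-- B replaces A's global single-pass pivot merging of win/lose dict-of-sets by a per-boxer
-- breadth-first fixpoint expansion over adjacency dicts (one step per round, expanding only
-- through ranked boxers 1..n, stopping when stable): a different algorithm, not faster.

-- ===== PORT A =====
-- Python A iterates over hash sets only to build other sets / take lens, so the result is
-- iteration-order independent; the port folds over the PySem.Set element lists instead.
def solution (n : Int) (results : List (List Int)) : Int :=
  -- for winner, loser in results: win[winner].add(loser); lose[loser].add(winner)
  -- ('winner, loser = r' raises unless len(r) = 2: Pre_ excludes other rows)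
  let wl0 := results.foldl
    (fun (p : PySem.Dict Int (PySem.Set Int) × PySem.Dict Int (PySem.Set Int)) r =>
      let winner := (PySem.List.pyGet? r 0).getD 0
      let loser := (PySem.List.pyGet? r 1).getD 0
      (p.1.insert winner (PySem.Set.add (p.1.getD winner PySem.Set.empty) loser),
       p.2.insert loser (PySem.Set.add (p.2.getD loser PySem.Set.empty) winner)))
    (PySem.Dict.empty, PySem.Dict.empty)
  -- for boxer in range(1, n+1): two merging loops (defaultdict reads ported as getD)
  let wl1 := (PySem.List.pyRange 1 (n + 1) 1).foldl
    (fun (p : PySem.Dict Int (PySem.Set Int) × PySem.Dict Int (PySem.Set Int)) boxer =>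
      let lose1 := (p.1.getD boxer PySem.Set.empty).foldl
        (fun (d : PySem.Dict Int (PySem.Set Int)) l =>
          d.insert l (PySem.Set.update (d.getD l PySem.Set.empty) (d.getD boxer PySem.Set.empty)))
        p.2
      let win1 := (lose1.getD boxer PySem.Set.empty).foldl
        (fun (d : PySem.Dict Int (PySem.Set Int)) w =>
          d.insert w (PySem.Set.update (d.getD w PySem.Set.empty) (d.getD boxer PySem.Set.empty)))
        p.1
      (win1, lose1))
    wl0
  -- for boxer in range(1, n+1): if len(win[boxer]) + len(lose[boxer]) == n - 1: answer += 1
  (PySem.List.pyRange 1 (n + 1) 1).foldl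
    (fun (acc : Int) boxer =>
      if PySem.Set.len (wl1.1.getD boxer PySem.Set.empty)
           + PySem.Set.len (wl1.2.getD boxer PySem.Set.empty) = n - 1
      then acc + 1 else acc) 0

-- ===== PORT B =====
-- grow = set(); for x in s: if 1 <= x <= n: grow |= adj.get(x, set())
-- (iterating the hash set s only to union sets: order-independent)
def pvGrow (n : Int) (adj : PySem.Dict Int (PySem.Set Int)) (s : PySem.Set Int) :
    PySem.Set Int :=
  s.foldl
    (fun (g : PySem.Set Int) x =>
      if 1 ≤ x ∧ x ≤ n then PySem.Set.update g (adj.getD x PySem.Set.empty) else g)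
    PySem.Set.empty

-- one round of B's expansion loop; the Bool is the 'break' flag (true = the loop has
-- exited: the remaining iterations of the ported fold leave the state untouched)
def pvReachStep (n : Int) (adj : PySem.Dict Int (PySem.Set Int))
    (p : PySem.Set Int × Bool) (_i : Int) : PySem.Set Int × Bool :=
  if p.2 then p
  else
    let new := PySem.Set.diff (pvGrow n adj p.1) p.1
    -- if not new: break  /  s |= new
    if new = [] then (p.1, true) else (PySem.Set.update p.1 new, false)

-- def reach(start, adj): s = set(adj.get(start, ())); for _ in range(n): … ; return s
def pvReach (n : Int) (adj : PySem.Dict Int (PySem.Set Int)) (start : Int) : PySem.Set Int :=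
  ((PySem.List.pyRange 0 n 1).foldl (pvReachStep n adj)
    (PySem.Set.ofList (adj.getD start PySem.Set.empty), false)).1

def solution_alt (n : Int) (results : List (List Int)) : Int :=
  -- for w, l in results: fwd.setdefault(w, set()).add(l); bwd.setdefault(l, set()).add(w)
  let fb := results.foldl
    (fun (p : PySem.Dict Int (PySem.Set Int) × PySem.Dict Int (PySem.Set Int)) r =>
      let w := (PySem.List.pyGet? r 0).getD 0
      let l := (PySem.List.pyGet? r 1).getD 0
      (p.1.insert w (PySem.Set.add (p.1.getD w PySem.Set.empty) l),
       p.2.insert l (PySem.Set.add (p.2.getD l PySem.Set.empty) w)))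
    (PySem.Dict.empty, PySem.Dict.empty)
  -- sum(1 for b in range(1, n+1) if len(reach(b, fwd)) + len(reach(b, bwd)) == n - 1)
  ((PySem.List.pyRange 1 (n + 1) 1).map
    (fun b =>
      if PySem.Set.len (pvReach n fb.1 b) + PySem.Set.len (pvReach n fb.2 b) = n - 1
      then (1 : Int) else 0)).sum

-- ===== PRECONDITION & SPEC =====
-- Pre_ excludes exactly the rows on which Python's 'for winner, loser in results'
-- unpacking raises ValueError (rows whose length is not 2); both A and B raise there.
def Pre_solution (n : Int) (results : List (List Int)) : Prop :=
  ∀ r ∈ results, r.length = 2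
instance (n : Int) (results : List (List Int)) : Decidable (Pre_solution n results) := by
  unfold Pre_solution; infer_instance

def pvWitness_solution : Int × List (List Int) :=
  (5, [[4, 3], [4, 2], [3, 2], [1, 2], [2, 5]])

def Spec_solution (n : Int) (results : List (List Int)) (out : Int) : Prop := out = solution_alt n results
instance (n : Int) (results : List (List Int)) (out : Int) : Decidable (Spec_solution n results out) := by unfold Spec_solution; infer_instance

-- ===== CLAIM (what is proved, stated in full; the proofs are below) =====
def Claim_equal_solution : Prop := ∀ (n : Int) (results : List (List Int)), Dom_solution n results → Pre_solution n results → Spec_solution n results (solution n results)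

-- ===== LEMMAS AND PROOFS =====

-- the first/second component read from a row (what 'winner, loser = r' binds on 2-rows)
def pvW0 (r : List Int) : Int := (PySem.List.pyGet? r 0).getD 0
def pvL0 (r : List Int) : Int := (PySem.List.pyGet? r 1).getD 0

-- the direct-defeat relation recorded in results
def pvE (results : List (List Int)) (u v : Int) : Prop :=
  ∃ r ∈ results, pvW0 r = u ∧ pvL0 r = v

-- one Floyd–Warshall closure step on a reachability relation, pivot k
def pvStepP (P : Int → Int → Prop) (k : Int) : Int → Int → Prop :=
  fun u v => P u v ∨ (P u k ∧ P k v)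

-- A's edge-building loop body (also B's: both sources build the two adjacency dicts
-- with the same per-row statement)
def pvBuildStep (p : PySem.Dict Int (PySem.Set Int) × PySem.Dict Int (PySem.Set Int))
    (r : List Int) : PySem.Dict Int (PySem.Set Int) × PySem.Dict Int (PySem.Set Int) :=
  let winner := (PySem.List.pyGet? r 0).getD 0
  let loser := (PySem.List.pyGet? r 1).getD 0
  (p.1.insert winner (PySem.Set.add (p.1.getD winner PySem.Set.empty) loser),
   p.2.insert loser (PySem.Set.add (p.2.getD loser PySem.Set.empty) winner))

-- A's inner merging loop: for x in ws: d[x].update(d[k])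
def pvMerge (k : Int) (ws : List Int) (d : PySem.Dict Int (PySem.Set Int)) :
    PySem.Dict Int (PySem.Set Int) :=
  ws.foldl
    (fun (d : PySem.Dict Int (PySem.Set Int)) x =>
      d.insert x (PySem.Set.update (d.getD x PySem.Set.empty) (d.getD k PySem.Set.empty)))
    d

-- A's outer loop body (one boxer)
def pvBodyA (p : PySem.Dict Int (PySem.Set Int) × PySem.Dict Int (PySem.Set Int))
    (boxer : Int) : PySem.Dict Int (PySem.Set Int) × PySem.Dict Int (PySem.Set Int) :=
  let lose1 := pvMerge boxer (p.1.getD boxer PySem.Set.empty) p.2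
  let win1 := pvMerge boxer (lose1.getD boxer PySem.Set.empty) p.1
  (win1, lose1)

-- chains: pvChain E K u l v = an E-path from u to v whose intermediate nodes are l, all in K
def pvChain (E : Int → Int → Prop) (K : Int → Prop) : Int → List Int → Int → Prop
  | u, [], v => E u v
  | u, x :: l, v => E u x ∧ K x ∧ pvChain E K x l v

def pvPath (E : Int → Int → Prop) (K : Int → Prop) (u v : Int) : Prop :=
  ∃ l, pvChain E K u l v

-- reachability by a chain of at most t intermediates
def pvReachN (E : Int → Int → Prop) (K : Int → Prop) (t : Nat) (b v : Int) : Prop :=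
  ∃ l, pvChain E K b l v ∧ l.length ≤ t

lemma pvUpdate_self (s : PySem.Set Int) : PySem.Set.update s s = s := by
  rw [PySem.Set.update_eq_append_filter]
  have h : List.filter (fun y => !s.contains y) (PySem.Set.ofList s) = [] := by
    apply List.filter_eq_nil_iff.mpr
    intro y hy
    have hm : y ∈ s := (PySem.Set.mem_ofList s y).mp hy
    simpa using hm
  rw [h, List.append_nil]

lemma pvMerge_spec (k : Int) (ws : List Int) :
    ∀ (d : PySem.Dict Int (PySem.Set Int)),
    (pvMerge k ws d).getD k PySem.Set.empty = d.getD k PySem.Set.empty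
  ∧ (∀ v u, u ∈ (pvMerge k ws d).getD v PySem.Set.empty ↔
      u ∈ d.getD v PySem.Set.empty ∨ (v ∈ ws ∧ u ∈ d.getD k PySem.Set.empty))
  ∧ ((∀ v, (d.getD v PySem.Set.empty).Nodup) →
      ∀ v, ((pvMerge k ws d).getD v PySem.Set.empty).Nodup) := by
  induction ws with
  | nil => intro d; refine ⟨rfl, by simp [pvMerge], fun h => h⟩
  | cons x ws ih =>
    intro d
    have hrec : pvMerge k (x :: ws) d
        = pvMerge k ws (d.insert x (PySem.Set.update (d.getD x PySem.Set.empty)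
            (d.getD k PySem.Set.empty))) := rfl
    set d1 := d.insert x (PySem.Set.update (d.getD x PySem.Set.empty)
        (d.getD k PySem.Set.empty)) with hd1
    have hget : ∀ v, d1.getD v PySem.Set.empty
        = if v = x then PySem.Set.update (d.getD x PySem.Set.empty) (d.getD k PySem.Set.empty)
          else d.getD v PySem.Set.empty := by
      intro v; rw [hd1, PySem.Dict.getD_insert]
    have hk : d1.getD k PySem.Set.empty = d.getD k PySem.Set.empty := by
      rw [hget]
      split_ifs with h
      · subst h; exact pvUpdate_self _
      · rfl
    obtain ⟨ihk, ihmem, ihnd⟩ := ih d1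
    refine ⟨by rw [hrec, ihk, hk], ?_, ?_⟩
    · intro v u
      rw [hrec, ihmem, hk, hget]
      by_cases hvx : v = x
      · subst hvx
        simp only [if_true, PySem.Set.mem_update, List.mem_cons, true_or, true_and]
        tauto
      · simp only [if_neg hvx, List.mem_cons]
        constructor
        · rintro (h | ⟨hv, hu⟩)
          · exact Or.inl h
          · exact Or.inr ⟨Or.inr hv, hu⟩
        · rintro (h | ⟨hv | hv, hu⟩)
          · exact Or.inl h
          · exact absurd hv hvx
          · exact Or.inr ⟨hv, hu⟩
    · intro hnd
      rw [hrec]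
      apply ihnd
      intro v
      rw [hget]
      split_ifs with h
      · exact PySem.Set.nodup_update _ _ (hnd x)
      · exact hnd v

lemma pvBuildA_spec (rs : List (List Int)) :
    ∀ (w l : PySem.Dict Int (PySem.Set Int)),
    (∀ u v, v ∈ (rs.foldl pvBuildStep (w, l)).1.getD u PySem.Set.empty ↔
      v ∈ w.getD u PySem.Set.empty ∨ ∃ r ∈ rs, pvW0 r = u ∧ pvL0 r = v)
  ∧ (∀ u v, u ∈ (rs.foldl pvBuildStep (w, l)).2.getD v PySem.Set.empty ↔
      u ∈ l.getD v PySem.Set.empty ∨ ∃ r ∈ rs, pvW0 r = u ∧ pvL0 r = v)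
  ∧ ((∀ u, (w.getD u PySem.Set.empty).Nodup) →
      ∀ u, ((rs.foldl pvBuildStep (w, l)).1.getD u PySem.Set.empty).Nodup)
  ∧ ((∀ v, (l.getD v PySem.Set.empty).Nodup) →
      ∀ v, ((rs.foldl pvBuildStep (w, l)).2.getD v PySem.Set.empty).Nodup) := by
  induction rs with
  | nil => intro w l; refine ⟨by simp, by simp, fun h => h, fun h => h⟩
  | cons r rs ih =>
    intro w l
    have hrec : (r :: rs).foldl pvBuildStep (w, l)
        = rs.foldl pvBuildStep (pvBuildStep (w, l) r) := rfl
    set w1 := w.insert (pvW0 r) (PySem.Set.add (w.getD (pvW0 r) PySem.Set.empty) (pvL0 r)) with hw1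
    set l1 := l.insert (pvL0 r) (PySem.Set.add (l.getD (pvL0 r) PySem.Set.empty) (pvW0 r)) with hl1
    have hstep : pvBuildStep (w, l) r = (w1, l1) := rfl
    rw [hrec, hstep]
    obtain ⟨ihw, ihl, ihwn, ihln⟩ := ih w1 l1
    have hgw : ∀ u, w1.getD u PySem.Set.empty
        = if u = pvW0 r then PySem.Set.add (w.getD (pvW0 r) PySem.Set.empty) (pvL0 r)
          else w.getD u PySem.Set.empty := fun u => by rw [hw1, PySem.Dict.getD_insert]
    have hgl : ∀ v, l1.getD v PySem.Set.empty
        = if v = pvL0 r then PySem.Set.add (l.getD (pvL0 r) PySem.Set.empty) (pvW0 r)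
          else l.getD v PySem.Set.empty := fun v => by rw [hl1, PySem.Dict.getD_insert]
    refine ⟨?_, ?_, ?_, ?_⟩
    · intro u v
      rw [ihw, hgw]
      simp only [List.mem_cons, exists_eq_or_imp]
      split_ifs with h
      · subst h
        rw [PySem.Set.mem_add]
        tauto
      · constructor
        · rintro (hm | hr)
          · exact Or.inl hm
          · exact Or.inr (Or.inr hr)
        · rintro (hm | ⟨hu, hv⟩ | hr)
          · exact Or.inl hm
          · exact absurd hu.symm h
          · exact Or.inr hr
    · intro u v
      rw [ihl, hgl]
      simp only [List.mem_cons, exists_eq_or_imp]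
      split_ifs with h
      · subst h
        rw [PySem.Set.mem_add]
        tauto
      · constructor
        · rintro (hm | hr)
          · exact Or.inl hm
          · exact Or.inr (Or.inr hr)
        · rintro (hm | ⟨hu, hv⟩ | hr)
          · exact Or.inl hm
          · exact absurd hv.symm h
          · exact Or.inr hr
    · intro hnd
      apply ihwn
      intro u
      rw [hgw]
      split_ifs with h
      · exact PySem.Set.nodup_add _ _ (hnd _)
      · exact hnd u
    · intro hnd
      apply ihln
      intro v
      rw [hgl]
      split_ifs with h
      · exact PySem.Set.nodup_add _ _ (hnd _)
      · exact hnd v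

lemma pvStepA_spec (k : Int) (win lose : PySem.Dict Int (PySem.Set Int)) (P : Int → Int → Prop)
    (hW : ∀ u v, v ∈ win.getD u PySem.Set.empty ↔ P u v)
    (hL : ∀ u v, u ∈ lose.getD v PySem.Set.empty ↔ P u v)
    (hWn : ∀ u, (win.getD u PySem.Set.empty).Nodup)
    (hLn : ∀ v, (lose.getD v PySem.Set.empty).Nodup) :
    (∀ u v, v ∈ (pvBodyA (win, lose) k).1.getD u PySem.Set.empty ↔ pvStepP P k u v)
  ∧ (∀ u v, u ∈ (pvBodyA (win, lose) k).2.getD v PySem.Set.empty ↔ pvStepP P k u v)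
  ∧ (∀ u, ((pvBodyA (win, lose) k).1.getD u PySem.Set.empty).Nodup)
  ∧ (∀ v, ((pvBodyA (win, lose) k).2.getD v PySem.Set.empty).Nodup) := by
  set lose1 := pvMerge k (win.getD k PySem.Set.empty) lose with hl1
  set win1 := pvMerge k (lose1.getD k PySem.Set.empty) win with hw1
  have hbody : pvBodyA (win, lose) k = (win1, lose1) := rfl
  obtain ⟨hk1, hmem1, hnd1⟩ := pvMerge_spec k (win.getD k PySem.Set.empty) lose
  obtain ⟨hk2, hmem2, hnd2⟩ := pvMerge_spec k (lose1.getD k PySem.Set.empty) win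
  rw [hbody]
  have hLmem : ∀ v u, u ∈ lose1.getD v PySem.Set.empty ↔ pvStepP P k u v := by
    intro v u
    rw [← hl1] at hmem1
    rw [hmem1, hW, hL, hL, pvStepP]
    tauto
  refine ⟨?_, ?_, ?_, ?_⟩
  · intro u v
    have hkk : lose1.getD k PySem.Set.empty = lose.getD k PySem.Set.empty := by
      rw [hl1]; exact hk1
    rw [← hw1] at hmem2
    rw [hmem2, hW, hkk, hL, hW, pvStepP]
  · exact fun u v => hLmem v u
  · intro u
    rw [hw1]
    exact hnd2 hWn u
  · intro v
    rw [hl1]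
    exact hnd1 hLn v

-- A's whole pivot loop, as a fold of pvStepP on the represented relation
lemma pvLoopA (ks : List Int) :
    ∀ (win lose : PySem.Dict Int (PySem.Set Int)) (P : Int → Int → Prop),
    (∀ u v, v ∈ win.getD u PySem.Set.empty ↔ P u v) →
    (∀ u v, u ∈ lose.getD v PySem.Set.empty ↔ P u v) →
    (∀ u, (win.getD u PySem.Set.empty).Nodup) →
    (∀ v, (lose.getD v PySem.Set.empty).Nodup) →
    (∀ u v, v ∈ (ks.foldl pvBodyA (win, lose)).1.getD u PySem.Set.empty ↔ (ks.foldl pvStepP P) u v)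
  ∧ (∀ u v, u ∈ (ks.foldl pvBodyA (win, lose)).2.getD v PySem.Set.empty ↔ (ks.foldl pvStepP P) u v)
  ∧ (∀ u, ((ks.foldl pvBodyA (win, lose)).1.getD u PySem.Set.empty).Nodup)
  ∧ (∀ v, ((ks.foldl pvBodyA (win, lose)).2.getD v PySem.Set.empty).Nodup) := by
  induction ks with
  | nil => intro win lose P hW hL hWn hLn; exact ⟨hW, hL, hWn, hLn⟩
  | cons k ks ih =>
    intro win lose P hW hL hWn hLn
    obtain ⟨hW1, hL1, hWn1, hLn1⟩ := pvStepA_spec k win lose P hW hL hWn hLn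
    have hfold : (k :: ks).foldl pvBodyA (win, lose)
        = ks.foldl pvBodyA ((pvBodyA (win, lose) k).1, (pvBodyA (win, lose) k).2) := by
      rw [List.foldl_cons]
    rw [hfold, show (k :: ks).foldl pvStepP P = ks.foldl pvStepP (pvStepP P k) from rfl]
    exact ih (pvBodyA (win, lose) k).1 (pvBodyA (win, lose) k).2 (pvStepP P k) hW1 hL1 hWn1 hLn1

-- ===== chain toolbox =====

lemma pvChain_append (E : Int → Int → Prop) (K : Int → Prop) (a b : List Int) (x v : Int) :
    ∀ u, pvChain E K u (a ++ x :: b) v ↔ pvChain E K u a x ∧ K x ∧ pvChain E K x b v := by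
  induction a with
  | nil => intro u; simp [pvChain]
  | cons y a ih =>
    intro u
    show (E u y ∧ K y ∧ pvChain E K y (a ++ x :: b) v) ↔ _
    rw [ih y]
    show _ ↔ (E u y ∧ K y ∧ pvChain E K y a x) ∧ K x ∧ pvChain E K x b v
    tauto

lemma pvChain_mem (E : Int → Int → Prop) (K : Int → Prop) :
    ∀ (l : List Int) (u v : Int), pvChain E K u l v → ∀ x ∈ l, K x := by
  intro l
  induction l with
  | nil => intro u v _ x hx; cases hx
  | cons y l ih =>
    intro u v h x hx
    obtain ⟨_, hKy, hrest⟩ := h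
    rcases List.mem_cons.mp hx with rfl | hx
    · exact hKy
    · exact ih y v hrest x hx

lemma pvChain_impK (E : Int → Int → Prop) (K K' : Int → Prop) (h : ∀ x, K x → K' x) :
    ∀ (l : List Int) (u v : Int), pvChain E K u l v → pvChain E K' u l v := by
  intro l
  induction l with
  | nil => intro u v hc; exact hc
  | cons y l ih =>
    intro u v hc
    exact ⟨hc.1, h y hc.2.1, ih y v hc.2.2⟩

lemma pvChain_congrE (E E' : Int → Int → Prop) (K : Int → Prop) (h : ∀ x y, E x y ↔ E' x y) :
    ∀ (l : List Int) (u v : Int), pvChain E K u l v → pvChain E' K u l v := by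
  intro l
  induction l with
  | nil => intro u v hc; exact (h u v).mp hc
  | cons y l ih =>
    intro u v hc
    exact ⟨(h u y).mp hc.1, hc.2.1, ih y v hc.2.2⟩

lemma pvPath_congr (E E' : Int → Int → Prop) (K K' : Int → Prop)
    (hE : ∀ x y, E x y ↔ E' x y) (hK : ∀ x, K x ↔ K' x) (u v : Int) :
    pvPath E K u v ↔ pvPath E' K' u v := by
  constructor
  · rintro ⟨l, hc⟩
    exact ⟨l, pvChain_impK E' K K' (fun x hx => (hK x).mp hx) l u v (pvChain_congrE E E' K hE l u v hc)⟩
  · rintro ⟨l, hc⟩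
    exact ⟨l, pvChain_impK E K' K (fun x hx => (hK x).mpr hx) l u v
      (pvChain_congrE E' E K' (fun x y => (hE x y).symm) l u v hc)⟩

lemma pvPath_false (E : Int → Int → Prop) (u v : Int) :
    pvPath E (fun _ => False) u v ↔ E u v := by
  constructor
  · rintro ⟨l, hc⟩
    cases l with
    | nil => exact hc
    | cons x l => exact absurd hc.2.1 (fun h => h)
  · intro h; exact ⟨[], h⟩

lemma pvPath_snoc (E : Int → Int → Prop) (K : Int → Prop) (b x y : Int)
    (h : pvPath E K b x) (hK : K x) (hE : E x y) : pvPath E K b y := by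
  obtain ⟨l, hc⟩ := h
  refine ⟨l ++ [x], ?_⟩
  exact (pvChain_append E K l [] x y b).mpr ⟨hc, hK, hE⟩

lemma pvChain_flip (E : Int → Int → Prop) (K : Int → Prop) :
    ∀ (l : List Int) (a c : Int),
      pvChain (fun x y => E y x) K a l c ↔ pvChain E K c l.reverse a := by
  intro l
  induction l with
  | nil => intro a c; simp [pvChain]
  | cons x l ih =>
    intro a c
    show (E x a ∧ K x ∧ pvChain (fun x y => E y x) K x l c) ↔ _
    rw [ih x, List.reverse_cons, pvChain_append E K l.reverse [] x a c]
    show _ ↔ pvChain E K c l.reverse x ∧ K x ∧ E x a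
    tauto

lemma pvPath_flip (E : Int → Int → Prop) (K : Int → Prop) (a c : Int) :
    pvPath (fun x y => E y x) K a c ↔ pvPath E K c a := by
  constructor
  · rintro ⟨l, hc⟩
    exact ⟨l.reverse, (pvChain_flip E K l a c).mp hc⟩
  · rintro ⟨l, hc⟩
    refine ⟨l.reverse, (pvChain_flip E K l.reverse a c).mpr ?_⟩
    rwa [List.reverse_reverse]

-- removing repeated intermediates from a chain
lemma pvChain_shorten (E : Int → Int → Prop) (K : Int → Prop) :
    ∀ (l : List Int) (b v : Int), pvChain E K b l v →
      ∃ l', l'.Nodup ∧ pvChain E K b l' v := by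
  intro l
  induction l with
  | nil => intro b v hc; exact ⟨[], List.nodup_nil, hc⟩
  | cons x l ih =>
    intro b v hc
    obtain ⟨hbx, hKx, hrest⟩ := hc
    obtain ⟨l2, hnd2, hc2⟩ := ih x v hrest
    by_cases hx : x ∈ l2
    · obtain ⟨a, c, rfl⟩ := List.append_of_mem hx
      have hsplit := (pvChain_append E K a c x v x).mp hc2
      have hnd := List.nodup_append.mp hnd2
      have hndc : (x :: c).Nodup := hnd.2.1
      refine ⟨x :: c, hndc, hbx, hKx, hsplit.2.2⟩
    · exact ⟨x :: l2, List.nodup_cons.mpr ⟨hx, hnd2⟩, hbx, hKx, hc2⟩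

-- a duplicate-free list of integers in [1, n] has at most n.toNat elements
lemma pvNodupK_len (n : Int) (l : List Int) (hnd : l.Nodup)
    (hK : ∀ x ∈ l, 1 ≤ x ∧ x ≤ n) : l.length ≤ n.toNat := by
  have h1 : l.toFinset ⊆ Finset.Icc 1 n := by
    intro x hx
    rw [List.mem_toFinset] at hx
    exact Finset.mem_Icc.mpr (hK x hx)
  have h2 := Finset.card_le_card h1
  rw [List.toFinset_card_of_nodup hnd] at h2
  rw [Int.card_Icc] at h2
  have : ((n + 1 - 1).toNat : ℤ) = n + 1 - 1 ∨ n + 1 - 1 < 0 := by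
    omega
  omega

-- ===== Floyd–Warshall characterisation of A's pivot fold =====

lemma pvStepP_path (E : Int → Int → Prop) (K : Int → Prop) (k u v : Int) :
    pvStepP (pvPath E K) k u v ↔ pvPath E (fun x => K x ∨ x = k) u v := by
  have aux : ∀ (l : List Int) (u : Int),
      pvChain E (fun x => K x ∨ x = k) u l v → pvStepP (pvPath E K) k u v := by
    intro l
    induction l with
    | nil => intro u hc; exact Or.inl ⟨[], hc⟩
    | cons x l ih =>
      intro u hc
      obtain ⟨hux, hKx, hrest⟩ := hc
      by_cases hxk : x = k
      · subst hxk
        have h2 : pvPath E K x v := by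
          rcases ih x hrest with h | ⟨_, h⟩
          · exact h
          · exact h
        exact Or.inr ⟨⟨[], hux⟩, h2⟩
      · have hKx' : K x := hKx.resolve_right hxk
        rcases ih x hrest with ⟨l', hc'⟩ | ⟨⟨l1, hc1⟩, h2⟩
        · exact Or.inl ⟨x :: l', hux, hKx', hc'⟩
        · exact Or.inr ⟨⟨x :: l1, hux, hKx', hc1⟩, h2⟩
  constructor
  · rintro (⟨l, hc⟩ | ⟨⟨l1, h1⟩, ⟨l2, h2⟩⟩)
    · exact ⟨l, pvChain_impK E K _ (fun x hx => Or.inl hx) l u v hc⟩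
    · refine ⟨l1 ++ k :: l2, (pvChain_append E _ l1 l2 k v u).mpr ⟨?_, Or.inr rfl, ?_⟩⟩
      · exact pvChain_impK E K _ (fun x hx => Or.inl hx) l1 u k h1
      · exact pvChain_impK E K _ (fun x hx => Or.inl hx) l2 k v h2
  · rintro ⟨l, hc⟩
    exact aux l u hc

lemma pvFoldFW (E : Int → Int → Prop) :
    ∀ (ks : List Int) (K : Int → Prop) (P : Int → Int → Prop),
    (∀ u v, P u v ↔ pvPath E K u v) →
    ∀ u v, (ks.foldl pvStepP P) u v ↔ pvPath E (fun x => K x ∨ x ∈ ks) u v := by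
  intro ks
  induction ks with
  | nil =>
    intro K P hP u v
    rw [List.foldl_nil, hP u v]
    exact pvPath_congr E E K _ (fun _ _ => Iff.rfl) (fun x => by simp) u v
  | cons k ks ih =>
    intro K P hP u v
    have h1 : ∀ u v, pvStepP P k u v ↔ pvPath E (fun x => K x ∨ x = k) u v := by
      intro u v
      rw [show pvStepP P k u v ↔ pvStepP (pvPath E K) k u v from by
        unfold pvStepP; rw [hP, hP, hP]]
      exact pvStepP_path E K k u v
    rw [List.foldl_cons, ih (fun x => K x ∨ x = k) (pvStepP P k) h1 u v]
    refine pvPath_congr E E _ _ (fun _ _ => Iff.rfl) (fun x => ?_) u v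
    simp only [List.mem_cons]
    tauto

-- ===== characterisation of B's reach loop =====

def pvAdjRel (adj : PySem.Dict Int (PySem.Set Int)) (x y : Int) : Prop :=
  y ∈ adj.getD x PySem.Set.empty

def pvKn (n : Int) (x : Int) : Prop := 1 ≤ x ∧ x ≤ n

lemma pvGrow_fold_mem (n : Int) (adj : PySem.Dict Int (PySem.Set Int)) (s : List Int) :
    ∀ (g0 : PySem.Set Int) (y : Int),
    y ∈ s.foldl
        (fun (g : PySem.Set Int) x =>
          if 1 ≤ x ∧ x ≤ n then PySem.Set.update g (adj.getD x PySem.Set.empty) else g) g0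
      ↔ y ∈ g0 ∨ ∃ x ∈ s, pvKn n x ∧ pvAdjRel adj x y := by
  induction s with
  | nil => intro g0 y; simp
  | cons x s ih =>
    intro g0 y
    rw [List.foldl_cons]
    by_cases hx : 1 ≤ x ∧ x ≤ n
    · rw [if_pos hx, ih, PySem.Set.mem_update]
      simp only [List.mem_cons, exists_eq_or_imp]
      unfold pvKn pvAdjRel
      tauto
    · rw [if_neg hx, ih]
      simp only [List.mem_cons, exists_eq_or_imp]
      unfold pvKn pvAdjRel
      tauto

lemma pvGrow_mem (n : Int) (adj : PySem.Dict Int (PySem.Set Int)) (s : PySem.Set Int)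
    (y : Int) : y ∈ pvGrow n adj s ↔ ∃ x ∈ s, pvKn n x ∧ pvAdjRel adj x y := by
  unfold pvGrow
  rw [pvGrow_fold_mem]
  simp [PySem.Set.empty]

lemma pvReachN_succ (E : Int → Int → Prop) (K : Int → Prop) (t : Nat) (b : Int)
    (s s' : Int → Prop) (hss : ∀ v, s v → s' v)
    (h1 : ∀ v, pvReachN E K t b v → s v)
    (hcl : ∀ y, (∃ x, s x ∧ K x ∧ E x y) → s' y) :
    ∀ v, pvReachN E K (t + 1) b v → s' v := by
  intro v hv
  obtain ⟨l, hc, hlen⟩ := hv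
  rcases List.eq_nil_or_concat l with rfl | ⟨l', x, rfl⟩
  · exact hss v (h1 v ⟨[], hc, Nat.zero_le t⟩)
  · rw [List.concat_eq_append] at hc hlen
    have hsplit := (pvChain_append E K l' [] x v b).mp hc
    have hlen' : l'.length ≤ t := by
      rw [List.length_append] at hlen
      simp at hlen
      omega
    have hx : s x := h1 x ⟨l', hsplit.1, hlen'⟩
    exact hcl v ⟨x, hx, hsplit.2.1, hsplit.2.2⟩

-- loop invariant of B's expansion rounds
def pvInv (n : Int) (adj : PySem.Dict Int (PySem.Set Int)) (b : Int) (t : Nat)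
    (p : PySem.Set Int × Bool) : Prop :=
  p.1.Nodup
  ∧ (∀ v, pvReachN (pvAdjRel adj) (pvKn n) t b v → v ∈ p.1)
  ∧ (∀ v ∈ p.1, pvPath (pvAdjRel adj) (pvKn n) b v)
  ∧ (p.2 = true → ∀ y, (∃ x, x ∈ p.1 ∧ pvKn n x ∧ pvAdjRel adj x y) → y ∈ p.1)

lemma pvInv_step (n : Int) (adj : PySem.Dict Int (PySem.Set Int)) (b : Int) (t : Nat)
    (p : PySem.Set Int × Bool) (i : Int) (h : pvInv n adj b t p) :
    pvInv n adj b (t + 1) (pvReachStep n adj p i) := by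
  rw [show pvReachStep n adj p i
      = (if p.2 = true then p
         else (if PySem.Set.diff (pvGrow n adj p.1) p.1 = [] then (p.1, true)
               else (PySem.Set.update p.1 (PySem.Set.diff (pvGrow n adj p.1) p.1), false)))
      from rfl]
  obtain ⟨hnd, hre, hpath, hclos⟩ := h
  by_cases hstop : p.2 = true
  · rw [if_pos hstop]
    refine ⟨hnd, ?_, hpath, hclos⟩
    exact pvReachN_succ _ _ t b (fun v => v ∈ p.1) (fun v => v ∈ p.1)
      (fun v hv => hv) hre (hclos hstop)
  · rw [if_neg hstop]
    by_cases hne : PySem.Set.diff (pvGrow n adj p.1) p.1 = []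
    · rw [if_pos hne]
      have hclosed : ∀ y, (∃ x, x ∈ p.1 ∧ pvKn n x ∧ pvAdjRel adj x y) → y ∈ p.1 := by
        rintro y ⟨x, hx1, hx2, hx3⟩
        by_contra hy
        have hmem : y ∈ PySem.Set.diff (pvGrow n adj p.1) p.1 :=
          (PySem.Set.mem_diff _ _ _).mpr ⟨(pvGrow_mem n adj p.1 y).mpr ⟨x, hx1, hx2, hx3⟩, hy⟩
        rw [hne] at hmem
        cases hmem
      refine ⟨hnd, ?_, hpath, fun _ => hclosed⟩
      exact pvReachN_succ _ _ t b (fun v => v ∈ p.1) (fun v => v ∈ p.1)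
        (fun v hv => hv) hre hclosed
    · rw [if_neg hne]
      refine ⟨PySem.Set.nodup_update _ _ hnd, ?_, ?_, fun hh => absurd hh Bool.false_ne_true⟩
      · refine pvReachN_succ _ _ t b (fun v => v ∈ p.1)
          (fun v => v ∈ PySem.Set.update p.1 (PySem.Set.diff (pvGrow n adj p.1) p.1))
          (fun v hv => (PySem.Set.mem_update _ _ _).mpr (Or.inl hv)) hre ?_
        intro y hy
        rw [PySem.Set.mem_update]
        by_cases hyp : y ∈ p.1
        · exact Or.inl hyp
        · exact Or.inr ((PySem.Set.mem_diff _ _ _).mpr ⟨(pvGrow_mem n adj p.1 y).mpr hy, hyp⟩)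
      · intro v hv
        rcases (PySem.Set.mem_update _ _ _).mp hv with hv | hv
        · exact hpath v hv
        · have hvg := ((PySem.Set.mem_diff _ _ _).mp hv).1
          obtain ⟨x, hx1, hx2, hx3⟩ := (pvGrow_mem n adj p.1 v).mp hvg
          exact pvPath_snoc _ _ b x v (hpath x hx1) hx2 hx3

lemma pvInv_loop (n : Int) (adj : PySem.Dict Int (PySem.Set Int)) (b : Int)
    (rounds : List Int) :
    ∀ (p : PySem.Set Int × Bool) (t : Nat), pvInv n adj b t p →
      pvInv n adj b (t + rounds.length) (rounds.foldl (pvReachStep n adj) p) := by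
  induction rounds with
  | nil => intro p t h; simpa using h
  | cons i rs ih =>
    intro p t h
    rw [List.foldl_cons, List.length_cons]
    have h2 := ih (pvReachStep n adj p i) (t + 1) (pvInv_step n adj b t p i h)
    have harith : t + (rs.length + 1) = t + 1 + rs.length := by omega
    rw [harith]
    exact h2

lemma pvReach_spec (n : Int) (adj : PySem.Dict Int (PySem.Set Int)) (b : Int) :
    (pvReach n adj b).Nodup
  ∧ (∀ v, v ∈ pvReach n adj b ↔ pvPath (pvAdjRel adj) (pvKn n) b v) := by
  have hbase : pvInv n adj b 0 (PySem.Set.ofList (adj.getD b PySem.Set.empty), false) := by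
    refine ⟨PySem.Set.nodup_ofList _, ?_, ?_, fun hh => absurd hh Bool.false_ne_true⟩
    · rintro v ⟨l, hc, hlen⟩
      have hl : l = [] := List.eq_nil_of_length_eq_zero (Nat.le_zero.mp hlen)
      subst hl
      exact (PySem.Set.mem_ofList _ _).mpr hc
    · intro v hv
      exact ⟨[], (PySem.Set.mem_ofList _ _).mp hv⟩
  have hloop := pvInv_loop n adj b (PySem.List.pyRange 0 n 1) _ 0 hbase
  obtain ⟨hnd, hre, hpath, _⟩ := hloop
  have hlenR : (PySem.List.pyRange 0 n 1).length = n.toNat := by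
    rw [PySem.List.length_pyRange_one]
    simp
  constructor
  · exact hnd
  · intro v
    constructor
    · exact fun hv => hpath v hv
    · rintro ⟨l, hc⟩
      obtain ⟨l', hnd', hc'⟩ := pvChain_shorten _ _ l b v hc
      have hK := pvChain_mem _ _ l' b v hc'
      have hlen : l'.length ≤ n.toNat := pvNodupK_len n l' hnd' (fun x hx => hK x hx)
      apply hre
      refine ⟨l', hc', ?_⟩
      rw [hlenR]
      omega

-- two Nodup lists with the same members have the same length
lemma pvLen_eq_of_mem_iff (xs ys : List Int) (hx : xs.Nodup) (hy : ys.Nodup)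
    (h : ∀ a, a ∈ xs ↔ a ∈ ys) : xs.length = ys.length := by
  exact ((List.perm_ext_iff_of_nodup hx hy).mpr h).length_eq

-- counting fold (A) versus 0/1-sum (B) over the same predicate
lemma pvCount_eq (P : Int → Prop) [DecidablePred P] (l : List Int) :
    l.foldl (fun acc x => if P x then acc + 1 else acc) (0 : Int)
      = (l.map (fun x => if P x then (1 : Int) else 0)).sum := by
  have hf : (fun (acc : Int) x => if P x then acc + 1 else acc)
      = (fun (acc : Int) x => if (fun y => decide (P y)) x = true then acc + 1 else acc) := by
    funext acc x
    by_cases h : P x <;> simp [h]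
  have hg : (fun x => if P x then (1 : Int) else 0)
      = (fun x => if (fun y => decide (P y)) x = true then (1 : Int) else 0) := by
    funext x
    by_cases h : P x <;> simp [h]
  rw [hf, hg, PySem.List.foldl_count_if, PySem.List.sum_map_ite_one_zero, zero_add]

-- ===== VERDICT (by name: the statement is the Claim_ definition above) =====
theorem solution_spec : Claim_equal_solution := by
  intro n results _hdom _hpre
  show solution n results = solution_alt n results
  have hA : solution n results =
      (PySem.List.pyRange 1 (n + 1) 1).foldl
        (fun (acc : Int) boxer =>
          if PySem.Set.len
                (((PySem.List.pyRange 1 (n + 1) 1).foldl pvBodyA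
                    (results.foldl pvBuildStep (PySem.Dict.empty, PySem.Dict.empty))).1.getD
                  boxer PySem.Set.empty)
              + PySem.Set.len
                (((PySem.List.pyRange 1 (n + 1) 1).foldl pvBodyA
                    (results.foldl pvBuildStep (PySem.Dict.empty, PySem.Dict.empty))).2.getD
                  boxer PySem.Set.empty)
              = n - 1
          then acc + 1 else acc) 0 := rfl
  have hB : solution_alt n results =
      ((PySem.List.pyRange 1 (n + 1) 1).map
        (fun b =>
          if PySem.Set.len
                (pvReach n (results.foldl pvBuildStep (PySem.Dict.empty, PySem.Dict.empty)).1 b)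
              + PySem.Set.len
                (pvReach n (results.foldl pvBuildStep (PySem.Dict.empty, PySem.Dict.empty)).2 b)
              = n - 1
          then (1 : Int) else 0)).sum := rfl
  rw [hA, hB]
  set ks := PySem.List.pyRange 1 (n + 1) 1 with hks
  set wl0 := results.foldl pvBuildStep (PySem.Dict.empty, PySem.Dict.empty) with hwl0
  -- the built dicts represent the direct-defeat relation pvE
  obtain ⟨hw0, hl0, hwn0, hln0⟩ := pvBuildA_spec results PySem.Dict.empty PySem.Dict.empty
  have hW0 : ∀ u v, v ∈ wl0.1.getD u PySem.Set.empty ↔ pvE results u v := by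
    intro u v
    rw [hwl0, hw0]
    simp [PySem.Dict.getD_empty, PySem.Set.empty, pvE]
  have hL0 : ∀ u v, u ∈ wl0.2.getD v PySem.Set.empty ↔ pvE results u v := by
    intro u v
    rw [hwl0, hl0]
    simp [PySem.Dict.getD_empty, PySem.Set.empty, pvE]
  have hWn0 : ∀ u, (wl0.1.getD u PySem.Set.empty).Nodup := by
    rw [hwl0]
    apply hwn0
    intro u
    simp [PySem.Dict.getD_empty, PySem.Set.empty]
  have hLn0 : ∀ v, (wl0.2.getD v PySem.Set.empty).Nodup := by
    rw [hwl0]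
    apply hln0
    intro v
    simp [PySem.Dict.getD_empty, PySem.Set.empty]
  -- A's pivot loop computes the Floyd–Warshall fold of pvStepP …
  obtain ⟨hQW, hQL, hQWn, hQLn⟩ := pvLoopA ks wl0.1 wl0.2 (pvE results) hW0 hL0 hWn0 hLn0
  rw [show (wl0.1, wl0.2) = wl0 from rfl] at hQW hQL hQWn hQLn
  -- … which is exactly reachability through intermediates 1..n
  have hfw : ∀ u v, (ks.foldl pvStepP (pvE results)) u v ↔ pvPath (pvE results) (pvKn n) u v := by
    intro u v
    rw [pvFoldFW (pvE results) ks (fun _ => False) (pvE results)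
      (fun u v => (pvPath_false (pvE results) u v).symm) u v]
    refine pvPath_congr _ _ _ _ (fun _ _ => Iff.rfl) (fun x => ?_) u v
    rw [hks]
    simp only [PySem.List.mem_pyRange_one, pvKn, false_or]
    omega
  -- B's reach sets compute the same reachability (forwards / flipped)
  have hRF : ∀ b v, v ∈ pvReach n wl0.1 b ↔ pvPath (pvE results) (pvKn n) b v := by
    intro b v
    rw [(pvReach_spec n wl0.1 b).2 v]
    exact pvPath_congr _ _ _ _ (fun x y => hW0 x y) (fun _ => Iff.rfl) b v
  have hRB : ∀ b u, u ∈ pvReach n wl0.2 b ↔ pvPath (pvE results) (pvKn n) u b := by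
    intro b u
    rw [(pvReach_spec n wl0.2 b).2 u]
    rw [pvPath_congr (pvAdjRel wl0.2) (fun x y => pvE results y x) (pvKn n) (pvKn n)
      (fun x y => hL0 y x) (fun _ => Iff.rfl) b u]
    exact pvPath_flip (pvE results) (pvKn n) b u
  -- per-boxer, A's and B's counted sets have the same members, hence the same size
  have hlenW : ∀ b, PySem.Set.len ((ks.foldl pvBodyA wl0).1.getD b PySem.Set.empty)
      = PySem.Set.len (pvReach n wl0.1 b) := by
    intro b
    have hm : ∀ v, v ∈ (ks.foldl pvBodyA wl0).1.getD b PySem.Set.empty ↔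
        v ∈ pvReach n wl0.1 b := by
      intro v
      rw [hQW b v, hfw b v, hRF b v]
    have hlen := pvLen_eq_of_mem_iff _ _ (hQWn b) (pvReach_spec n wl0.1 b).1 hm
    simp only [PySem.Set.len]
    exact_mod_cast hlen
  have hlenL : ∀ b, PySem.Set.len ((ks.foldl pvBodyA wl0).2.getD b PySem.Set.empty)
      = PySem.Set.len (pvReach n wl0.2 b) := by
    intro b
    have hm : ∀ u, u ∈ (ks.foldl pvBodyA wl0).2.getD b PySem.Set.empty ↔
        u ∈ pvReach n wl0.2 b := by
      intro u
      rw [hQL u b, hfw u b, hRB b u]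
    have hlen := pvLen_eq_of_mem_iff _ _ (hQLn b) (pvReach_spec n wl0.2 b).1 hm
    simp only [PySem.Set.len]
    exact_mod_cast hlen
  -- identical conditions: A's counting fold is B's 0/1-sum
  have hfun : (fun (acc : Int) boxer =>
        if PySem.Set.len ((ks.foldl pvBodyA wl0).1.getD boxer PySem.Set.empty)
            + PySem.Set.len ((ks.foldl pvBodyA wl0).2.getD boxer PySem.Set.empty) = n - 1
        then acc + 1 else acc)
      = (fun (acc : Int) b =>
        if PySem.Set.len (pvReach n wl0.1 b) + PySem.Set.len (pvReach n wl0.2 b) = n - 1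
        then acc + 1 else acc) := by
    funext acc b
    rw [hlenW b, hlenL b]
  rw [hfun, pvCount_eq
    (fun b => PySem.Set.len (pvReach n wl0.1 b) + PySem.Set.len (pvReach n wl0.2 b) = n - 1) ks]
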